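-- pv_equiv track=rewrite | github.com/romashkaruss1-art/guarantor-bot | bot.py | _progress
-- ===== SOURCE A (Python) =====
-- def _progress(status: str) -> str:
--     completed = {"completed"}
--     paid_or_after = {"paid", "payment_confirmed", "goods_sent", "completed"}
--     confirmed_or_after = {"payment_confirmed", "goods_sent", "completed"}
--     sent_or_after = {"goods_sent", "completed"}
--     has_buyer = {"waiting_payment", "paid", "payment_confirmed", "goods_sent", "completed", "dispute"}
--     steps = [
--         ("Покупатель присоединился", status in has_buyer),
--         ("Оплата отмечена покупателем", status in paid_or_after),
--         ("Гарант подтвердил оплату",   status in confirmed_or_after),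
--         ("Товар отправлен продавцом",  status in sent_or_after),
--         ("Получение подтверждено",     status in completed),
--     ]
--     out, marked = [], False
--     for label, done in steps:
--         if done:
--             out.append(f"   ✅  <i>{label}</i>")
--         elif not marked:
--             marked = True
--             out.append(f"   🔵  <b>{label}</b>  ← <i>сейчас</i>")
--         else:
--             out.append(f"   ⚪️  {label}")
--     return "\n".join(out)
-- ===== SOURCE B (Python) =====
-- _LEVEL = {"completed": 5, "goods_sent": 4, "payment_confirmed": 3,
--           "paid": 2, "waiting_payment": 1, "dispute": 1}
--
-- _LABELS = [
--     "Покупатель присоединился",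
--     "Оплата отмечена покупателем",
--     "Гарант подтвердил оплату",
--     "Товар отправлен продавцом",
--     "Получение подтверждено",
-- ]
--
-- def _progress(status: str) -> str:
--     level = _LEVEL.get(status, 0)
--     lines = []
--     for i, label in enumerate(_LABELS):
--         if i < level:
--             lines.append(f"   ✅  <i>{label}</i>")
--         elif i == level:
--             lines.append(f"   🔵  <b>{label}</b>  ← <i>сейчас</i>")
--         else:
--             lines.append(f"   ⚪️  {label}")
--     return "\n".join(lines)
-- ===== Notes on version B (the rewrite author's own statement) =====
-- stated objective: simpler
-- what changed: Replaced the five membership sets and the stateful 'marked' flag by a single status→level lookup table and a pure index comparison (i < level done, i == level current) over the label list.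
import Mathlib
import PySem

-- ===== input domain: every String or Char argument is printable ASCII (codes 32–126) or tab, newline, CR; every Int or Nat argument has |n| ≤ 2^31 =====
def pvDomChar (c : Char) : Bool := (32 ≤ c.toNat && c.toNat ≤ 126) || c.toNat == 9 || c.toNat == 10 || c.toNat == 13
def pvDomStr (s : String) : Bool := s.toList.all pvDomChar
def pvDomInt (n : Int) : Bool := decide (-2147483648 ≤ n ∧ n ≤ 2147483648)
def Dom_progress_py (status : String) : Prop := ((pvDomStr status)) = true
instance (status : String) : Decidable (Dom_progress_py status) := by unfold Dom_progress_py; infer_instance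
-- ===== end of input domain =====

-- B replaces A's five membership sets and 'marked' flag by one status→level table and index comparisons (simpler decomposition).

-- ===== PORT A =====
def progress_py (status : String) : String :=
  let completed : PySem.Set String := PySem.Set.ofList ["completed"]
  let paid_or_after : PySem.Set String := PySem.Set.ofList ["paid", "payment_confirmed", "goods_sent", "completed"]
  let confirmed_or_after : PySem.Set String := PySem.Set.ofList ["payment_confirmed", "goods_sent", "completed"]
  let sent_or_after : PySem.Set String := PySem.Set.ofList ["goods_sent", "completed"]
  let has_buyer : PySem.Set String := PySem.Set.ofList ["waiting_payment", "paid", "payment_confirmed", "goods_sent", "completed", "dispute"]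
  let steps : List (String × Bool) :=
    [("Покупатель присоединился", PySem.Set.contains has_buyer status),
     ("Оплата отмечена покупателем", PySem.Set.contains paid_or_after status),
     ("Гарант подтвердил оплату", PySem.Set.contains confirmed_or_after status),
     ("Товар отправлен продавцом", PySem.Set.contains sent_or_after status),
     ("Получение подтверждено", PySem.Set.contains completed status)]
  let res := steps.foldl (fun (acc : List String × Bool) lb =>
      if lb.2 then (acc.1 ++ ["   ✅  <i>" ++ lb.1 ++ "</i>"], acc.2)
      else if !acc.2 then (acc.1 ++ ["   🔵  <b>" ++ lb.1 ++ "</b>  ← <i>сейчас</i>"], true)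
      else (acc.1 ++ ["   ⚪️  " ++ lb.1], acc.2)) ([], false)
  PySem.Str.join "\n" res.1

-- ===== PORT B =====
def pvLevelTable : List (String × Int) :=
  [("completed", 5), ("goods_sent", 4), ("payment_confirmed", 3),
   ("paid", 2), ("waiting_payment", 1), ("dispute", 1)]

def pvLabels : List String :=
  ["Покупатель присоединился", "Оплата отмечена покупателем",
   "Гарант подтвердил оплату", "Товар отправлен продавцом", "Получение подтверждено"]

def progress_py_alt (status : String) : String :=
  -- dict literal as association list; .get(status, 0) = value of first matching key, else 0
  let level : Int := (Option.map Prod.snd (pvLevelTable.find? (fun p => p.1 == status))).getD 0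
  let lines := (PySem.List.enumerate pvLabels 0).foldl (fun (acc : List String) il =>
      if (il.1 : Int) < level then acc ++ ["   ✅  <i>" ++ il.2 ++ "</i>"]
      else if (il.1 : Int) = level then acc ++ ["   🔵  <b>" ++ il.2 ++ "</b>  ← <i>сейчас</i>"]
      else acc ++ ["   ⚪️  " ++ il.2]) []
  PySem.Str.join "\n" lines

-- ===== PRECONDITION & SPEC =====
def Spec_progress_py (status : String) (out : String) : Prop := out = progress_py_alt status
instance (status : String) (out : String) : Decidable (Spec_progress_py status out) := by unfold Spec_progress_py; infer_instance

-- ===== CLAIM (what is proved, stated in full; the proofs are below) =====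
def Claim_equal_progress_py : Prop := ∀ (status : String), Dom_progress_py status → Spec_progress_py status (progress_py status)

-- ===== LEMMAS AND PROOFS =====

-- ===== VERDICT (by name: the statement is the Claim_ definition above) =====
set_option maxRecDepth 16000 in
set_option maxHeartbeats 4000000 in
theorem progress_py_spec : Claim_equal_progress_py := by
  intro status _
  unfold Spec_progress_py
  by_cases h1 : status = "completed"
  · subst h1
    simp [progress_py, progress_py_alt, pvLevelTable, pvLabels, PySem.Set.contains,
          PySem.Set.ofList, PySem.List.enumerate, PySem.Str.join]
  by_cases h2 : status = "goods_sent"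
  · subst h2
    simp [progress_py, progress_py_alt, pvLevelTable, pvLabels, PySem.Set.contains,
          PySem.Set.ofList, PySem.List.enumerate, PySem.Str.join]
  by_cases h3 : status = "payment_confirmed"
  · subst h3
    simp [progress_py, progress_py_alt, pvLevelTable, pvLabels, PySem.Set.contains,
          PySem.Set.ofList, PySem.List.enumerate, PySem.Str.join]
  by_cases h4 : status = "paid"
  · subst h4
    simp [progress_py, progress_py_alt, pvLevelTable, pvLabels, PySem.Set.contains,
          PySem.Set.ofList, PySem.List.enumerate, PySem.Str.join]
  by_cases h5 : status = "waiting_payment"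
  · subst h5
    simp [progress_py, progress_py_alt, pvLevelTable, pvLabels, PySem.Set.contains,
          PySem.Set.ofList, PySem.List.enumerate, PySem.Str.join]
  by_cases h6 : status = "dispute"
  · subst h6
    simp [progress_py, progress_py_alt, pvLevelTable, pvLabels, PySem.Set.contains,
          PySem.Set.ofList, PySem.List.enumerate, PySem.Str.join]
  simp [progress_py, progress_py_alt, PySem.Set.contains, pvLevelTable, pvLabels,
        PySem.Set.ofList, PySem.List.enumerate, PySem.Str.join, List.find?_cons,
        h1, h2, h3, h4, h5, h6,
        Ne.symm h1, Ne.symm h2, Ne.symm h3, Ne.symm h4, Ne.symm h5, Ne.symm h6]
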